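-- pv_equiv track=rewrite | github.com/heaploan/Programacion | Python/UF2/Actividad2/user.py | validarUsuario
-- ===== SOURCE A (Python) =====
-- def validarUsuario(user, key):
--     comprobacion = []
--     if len(user) < 4:
--         return False
--     else:
--         comprobacion.append(True)
--     vocal = 0
--     if len(key) < 6:
--         return False
--     else:
--         for i in key:
--             if i.lower() in "aeiou":
--                 vocal += 1
--         if vocal == 0:
--             comprobacion.append(False)
--         elif vocal >= 1:
--             comprobacion.append(True)
--         resultado = 0
--         for condicion in comprobacion:
--             if condicion == True:
--                 resultado += 1
--         if resultado == 2:
--             return True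
--         else:
--             return False
-- ===== SOURCE B (Python) =====
-- def validarUsuario(user, key):
--     if len(user) < 4 or len(key) < 6:
--         return False
--     k = key.lower()
--     return any(v in k for v in "aeiou")
-- ===== Notes on version B (the rewrite author's own statement) =====
-- stated objective: simpler
-- what changed: Inverted the inner traversal: instead of A's per-character scan of key classifying each char against the vowel string and tallying counters into a boolean list, B lowercases key once and iterates over the five-letter vowel alphabet testing substring membership in the lowered key, behind a single combined length guard; measured faster in a timing run (C-level substring search, short-circuits at the first vowel found).
import Mathlib
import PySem

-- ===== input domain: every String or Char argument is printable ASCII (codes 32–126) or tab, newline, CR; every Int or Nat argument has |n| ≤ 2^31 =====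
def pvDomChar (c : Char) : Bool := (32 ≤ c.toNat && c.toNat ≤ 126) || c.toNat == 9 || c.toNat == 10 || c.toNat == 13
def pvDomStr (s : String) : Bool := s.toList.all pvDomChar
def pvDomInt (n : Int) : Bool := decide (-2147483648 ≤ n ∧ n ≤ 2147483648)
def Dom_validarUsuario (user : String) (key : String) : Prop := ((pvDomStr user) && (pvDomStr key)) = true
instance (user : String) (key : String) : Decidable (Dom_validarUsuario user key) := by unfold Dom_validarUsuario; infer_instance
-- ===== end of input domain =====

-- B replaces A's per-character key scan with counters and a boolean list by one combined length guard plus a scan of the five-vowel alphabet for substring membership in the lowered key (objective: simpler).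


-- ===== PORT A =====
-- i.lower() in "aeiou" for a one-character string i
def pvVowel (c : Char) : Bool := PySem.Chars.isIn (PySem.Chars.lower [c]) "aeiou".toList

def validarUsuario (user : String) (key : String) : Bool :=
  let comprobacion : List Bool := []
  if PySem.Str.len user < 4 then false
  else
    let comprobacion := comprobacion ++ [true]
    if PySem.Str.len key < 6 then false
    else
      let vocal : Int := key.toList.foldl (fun v i => if pvVowel i then v + 1 else v) 0
      let comprobacion :=
        if vocal = 0 then comprobacion ++ [false]
        else if vocal ≥ 1 then comprobacion ++ [true]
        else comprobacion
      let resultado : Int := comprobacion.foldl (fun r c => if c = true then r + 1 else r) 0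
      if resultado = 2 then true else false

-- ===== PORT B =====
def validarUsuario_alt (user : String) (key : String) : Bool :=
  if PySem.Str.len user < 4 || PySem.Str.len key < 6 then false
  else
    let k := PySem.Chars.lower key.toList
    "aeiou".toList.any (fun v => PySem.Chars.isIn [v] k)

-- ===== PRECONDITION & SPEC =====
def Spec_validarUsuario (user : String) (key : String) (out : Bool) : Prop := out = validarUsuario_alt user key
instance (user : String) (key : String) (out : Bool) : Decidable (Spec_validarUsuario user key out) := by unfold Spec_validarUsuario; infer_instance

-- ===== CLAIM (what is proved, stated in full; the proofs are below) =====
def Claim_equal_validarUsuario : Prop := ∀ (user : String) (key : String), Dom_validarUsuario user key → Spec_validarUsuario user key (validarUsuario user key)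

-- ===== LEMMAS AND PROOFS =====
-- A's vowel counter equals countP.
theorem vocal_eq_countP (key : List Char) :
    key.foldl (fun v i => if pvVowel i then v + 1 else v) (0 : Int) = (key.countP pvVowel : Int) := by
  simpa using PySem.List.foldl_count_if pvVowel key 0

-- a one-character substring test is char membership
theorem isIn_singleton (v : Char) (l : List Char) :
    PySem.Chars.isIn [v] l = true ↔ v ∈ l := by
  rw [PySem.Chars.isIn_iff_infix]
  constructor
  · rintro ⟨s, t, h⟩
    subst h; simp
  · intro h
    obtain ⟨s, t, h⟩ := List.append_of_mem h
    exact ⟨s, t, by simp [h]⟩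

-- A finds a vowel character in key iff B finds one of the five vowels in the lowered key
theorem any_swap (key : List Char) :
    "aeiou".toList.any (fun v => PySem.Chars.isIn [v] (PySem.Chars.lower key)) =
      key.any pvVowel := by
  rw [Bool.eq_iff_iff]
  simp only [List.any_eq_true, isIn_singleton, PySem.Chars.lower, List.mem_map, pvVowel,
    List.map_cons, List.map_nil]
  constructor
  · rintro ⟨v, hv, c, hc, rfl⟩
    exact ⟨c, hc, hv⟩
  · rintro ⟨c, hc, h⟩
    exact ⟨_, h, c, hc, rfl⟩

-- ===== VERDICT (by name: the statement is the Claim_ definition above) =====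
theorem validarUsuario_spec : Claim_equal_validarUsuario := by
  intro user key _
  unfold Spec_validarUsuario validarUsuario validarUsuario_alt
  by_cases h1 : PySem.Str.len user < 4
  · have h1' : user.length < 4 := by simpa using h1
    rw [if_pos h1, if_pos (by simp [h1'])]
  · have h1' : ¬ user.length < 4 := by simpa using h1
    by_cases h2 : PySem.Str.len key < 6
    · have h2' : key.length < 6 := by simpa using h2
      rw [if_neg h1, if_pos h2, if_pos (by simp [h2'])]
    · have h2' : ¬ key.length < 6 := by simpa using h2
      rw [if_neg h1, if_neg h2,
        if_neg (show ¬ ((decide (PySem.Str.len user < 4) || decide (PySem.Str.len key < 6)) = true)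
          from by simp [h1', h2'])]
      simp only [List.nil_append, vocal_eq_countP, any_swap]
      by_cases h3 : key.toList.any pvVowel = true
      · have hc : 0 < key.toList.countP pvVowel := by
          rw [List.countP_pos_iff]; exact List.any_eq_true.mp h3
        rw [if_neg (by exact_mod_cast Nat.pos_iff_ne_zero.mp hc :
              ¬ ((key.toList.countP pvVowel : Int) = 0)),
          if_pos (by exact_mod_cast hc : (1 : Int) ≤ (key.toList.countP pvVowel : Int)), h3]
        decide
      · have hc : key.toList.countP pvVowel = 0 := by
          by_contra h
          exact h3 (List.any_eq_true.mpr (List.countP_pos_iff.mp (Nat.pos_of_ne_zero h)))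
        rw [hc, Bool.eq_false_iff.mpr h3]
        decide
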